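-- pv_equiv track=rewrite | github.com/TragicMayhem/advent_of_code | aoc_2021/day04/aoc2021_04a.py | make_grids
-- ===== SOURCE A (Python) =====
-- def make_grids(data):
--
--   output = []
--   tmp = []
--
--   for i, d in enumerate(data):
--     if i == 0:
--       continue
--     if d == []:
--       output.append(tmp)
--       tmp = []
--       continue
--     tmp.append(d)
--
--   output.append(tmp)
--
--   return output
-- ===== SOURCE B (Python) =====
-- def make_grids(data):
--   sub = data[1:]
--   seps = [i for i, x in enumerate(sub) if x == []]
--   output = []
--   start = 0
--   for s in seps:
--     output.append(sub[start:s])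
--     start = s + 1
--   output.append(sub[start:])
--   return output
-- ===== Notes on version B (the rewrite author's own statement) =====
-- stated objective: alternative
-- what changed: Replaces A's single accumulator loop (building each group element-by-element in tmp) with an index-then-slice plan: first collect the positions of the empty-row separators in data[1:], then emit each group as one slice between consecutive separator positions.
import Mathlib
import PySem

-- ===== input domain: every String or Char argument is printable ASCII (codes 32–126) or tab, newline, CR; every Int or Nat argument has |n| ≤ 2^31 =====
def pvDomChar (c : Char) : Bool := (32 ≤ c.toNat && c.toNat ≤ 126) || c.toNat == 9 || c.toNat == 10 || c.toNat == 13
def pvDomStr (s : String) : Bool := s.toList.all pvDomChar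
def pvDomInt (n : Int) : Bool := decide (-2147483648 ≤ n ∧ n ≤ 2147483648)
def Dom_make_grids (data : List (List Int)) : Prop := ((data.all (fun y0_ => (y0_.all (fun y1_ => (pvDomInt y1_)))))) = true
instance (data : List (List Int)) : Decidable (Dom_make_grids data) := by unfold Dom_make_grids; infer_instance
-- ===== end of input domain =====

-- B groups the rows after the first by first indexing the blank separators and then slicing between
-- them, instead of A's element-by-element accumulator loop; same cost, different decomposition.

-- ===== PORT A =====
-- literal port of A: fold over enumerate(data) with state (output, tmp), skipping index 0
def make_grids (data : List (List Int)) : List (List (List Int)) :=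
  let r := (PySem.List.enumerate data).foldl
    (fun (s : List (List (List Int)) × List (List Int)) p =>
      if p.1 == 0 then s
      else if p.2 == ([] : List Int) then (s.1 ++ [s.2], ([] : List (List Int)))
      else (s.1, s.2 ++ [p.2]))
    ([], [])
  r.1 ++ [r.2]

-- ===== PORT B =====
-- literal port of Source B: sub = data[1:]; seps = separator indices; slice between consecutive seps
def make_grids_alt (data : List (List Int)) : List (List (List Int)) :=
  let sub := PySem.List.slice data (some 1) none
  let seps := ((PySem.List.enumerate sub).filter (fun p => p.2 == ([] : List Int))).map (·.1)
  let r := seps.foldl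
    (fun (st : List (List (List Int)) × Int) s =>
      (st.1 ++ [PySem.List.slice sub (some st.2) (some s)], s + 1))
    ([], 0)
  r.1 ++ [PySem.List.slice sub (some r.2) none]

-- ===== PRECONDITION & SPEC =====
def Spec_make_grids (data : List (List Int)) (out : List (List (List Int))) : Prop := out = make_grids_alt data
instance (data : List (List Int)) (out : List (List (List Int))) : Decidable (Spec_make_grids data out) := by unfold Spec_make_grids; infer_instance

-- ===== CLAIM (what is proved, stated in full; the proofs are below) =====
def Claim_equal_make_grids : Prop := ∀ (data : List (List Int)), Dom_make_grids data → Spec_make_grids data (make_grids data)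

-- ===== LEMMAS AND PROOFS =====

-- common reference shape: split data.tail on empty rows, keeping empty and trailing groups
def sg : List (List Int) → List (List (List Int))
  | [] => [[]]
  | d :: rest =>
    if d = [] then [] :: sg rest
    else
      match sg rest with
      | g :: gs => (d :: g) :: gs
      | [] => [[d]]

lemma sg_ne_nil (l : List (List Int)) : sg l ≠ [] := by
  cases l with
  | nil => simp [sg]
  | cons d rest =>
    simp only [sg]
    split_ifs
    · simp
    · cases h : sg rest <;> simp

-- A side ---------------------------------------------------------------

def stepA (s : List (List (List Int)) × List (List Int)) (p : Int × List Int) :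
    List (List (List Int)) × List (List Int) :=
  if p.1 == 0 then s
  else if p.2 == ([] : List Int) then (s.1 ++ [s.2], ([] : List (List Int)))
  else (s.1, s.2 ++ [p.2])

lemma foldA (l : List (List Int)) : ∀ (s : Int) (out : List (List (List Int)))
    (tmp : List (List Int)), 1 ≤ s →
    ((PySem.List.enumerate l s).foldl stepA (out, tmp)).1 ++
      [((PySem.List.enumerate l s).foldl stepA (out, tmp)).2] = out ++ (tmp ++ (sg l).headD []) :: (sg l).tail := by
  induction l with
  | nil => intro s out tmp _; simp [PySem.List.enumerate_nil, sg]
  | cons d rest ih =>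
    intro s out tmp hs
    rw [PySem.List.enumerate_cons]
    simp only [List.foldl_cons]
    have hs0 : (s == 0) = false := by simp; omega
    by_cases hd : d = []
    · have : stepA (out, tmp) (s, d) = (out ++ [tmp], []) := by
        simp [stepA, hs0, hd]
      rw [this, ih (s+1) _ _ (by omega)]
      have hne := sg_ne_nil rest
      cases hrest : sg rest with
      | nil => exact absurd hrest hne
      | cons g gs => simp [sg, hd, hrest]
    · have : stepA (out, tmp) (s, d) = (out, tmp ++ [d]) := by
        simp [stepA, hs0, hd]
      rw [this, ih (s+1) _ _ (by omega)]
      cases hrest : sg rest with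
      | nil => exact absurd hrest (sg_ne_nil rest)
      | cons g gs => simp [sg, hd, hrest]

lemma make_grids_eq_sg (data : List (List Int)) : make_grids data = sg data.tail := by
  cases data with
  | nil => simp [make_grids, PySem.List.enumerate_nil, sg]
  | cons d rest =>
    show ((PySem.List.enumerate (d :: rest) 0).foldl stepA ([], [])).1 ++
          [((PySem.List.enumerate (d :: rest) 0).foldl stepA ([], [])).2] = sg rest
    rw [PySem.List.enumerate_cons]
    simp only [List.foldl_cons]
    have h0 : stepA ([], []) (0, d) = ([], []) := by simp [stepA]
    rw [h0]
    simp only [zero_add]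
    rw [foldA rest 1 [] [] (by omega)]
    cases hrest : sg rest with
    | nil => exact absurd hrest (sg_ne_nil rest)
    | cons g gs => simp

-- B side ---------------------------------------------------------------

def sepsF (l : List (List Int)) (s : Int) : List Int :=
  ((PySem.List.enumerate l s).filter (fun p => p.2 == ([] : List Int))).map (·.1)

lemma sepsF_cons (d : List Int) (l : List (List Int)) (s : Int) :
    sepsF (d :: l) s = if d = [] then s :: sepsF l (s + 1) else sepsF l (s + 1) := by
  simp only [sepsF, PySem.List.enumerate_cons, List.filter_cons]
  by_cases hd : d = [] <;> simp [hd]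

lemma sepsF_shift (l : List (List Int)) : ∀ s : Int,
    sepsF l (s + 1) = (sepsF l s).map (· + 1) := by
  induction l with
  | nil => intro s; simp [sepsF, PySem.List.enumerate_nil]
  | cons d rest ih =>
    intro s
    rw [sepsF_cons, sepsF_cons]
    by_cases hd : d = [] <;> simp [hd, ih (s + 1)]

lemma sepsF_nonneg (l : List (List Int)) : ∀ (s : Int), ∀ x ∈ sepsF l s, s ≤ x := by
  induction l with
  | nil => intro s x hx; simp [sepsF, PySem.List.enumerate_nil] at hx
  | cons d rest ih =>
    intro s x hx
    rw [sepsF_cons] at hx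
    by_cases hd : d = []
    · simp [hd] at hx
      rcases hx with rfl | hx
      · omega
      · have := ih (s + 1) x hx; omega
    · simp [hd] at hx
      have := ih (s + 1) x hx; omega

def bGo (sub : List (List Int)) (start : Int) : List Int → List (List (List Int))
  | [] => [PySem.List.slice sub (some start) none]
  | s :: ss => PySem.List.slice sub (some start) (some s) :: bGo sub (s + 1) ss

lemma bGo_shift (d : List Int) (l : List (List Int)) (ss : List Int) :
    ∀ (start : Int), 0 ≤ start → (∀ x ∈ ss, 0 ≤ x) →
    bGo (d :: l) (start + 1) (ss.map (· + 1)) = bGo l start ss := by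
  induction ss with
  | nil =>
    intro start h0 _
    simp only [List.map_nil, bGo]
    rw [PySem.List.slice_from _ (by omega), PySem.List.slice_from _ h0]
    congr 1
    have : (start + 1).toNat = start.toNat + 1 := by omega
    simp [this]
  | cons s ss ih =>
    intro start h0 hss
    have hs : 0 ≤ s := hss s (by simp)
    simp only [List.map_cons, bGo]
    rw [ih (s + 1) (by omega) (fun x hx => hss x (by simp [hx]))]
    congr 1
    rw [PySem.List.slice_toNat _ (by omega) (by omega),
        PySem.List.slice_toNat _ h0 hs]
    have h1 : (start + 1).toNat = start.toNat + 1 := by omega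
    have h2 : (s + 1).toNat = s.toNat + 1 := by omega
    simp [h1, h2]

lemma bGo_sepsF (l : List (List Int)) : bGo l 0 (sepsF l 0) = sg l := by
  induction l with
  | nil => simp [sepsF, PySem.List.enumerate_nil, bGo, sg, PySem.List.slice_from]
  | cons d rest ih =>
    rw [sepsF_cons]
    have hshift : sepsF rest 1 = (sepsF rest 0).map (· + 1) := by
      simpa using sepsF_shift rest 0
    by_cases hd : d = []
    · rw [if_pos hd]
      simp only [zero_add]
      rw [hshift]
      simp only [bGo]
      rw [show (0:Int) + 1 = 0 + 1 from rfl,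
          bGo_shift d rest (sepsF rest 0) 0 le_rfl (sepsF_nonneg rest 0), ih]
      simp [sg, hd, PySem.List.slice_toNat _ le_rfl le_rfl]
    · rw [if_neg hd]
      simp only [zero_add]
      rw [hshift]
      cases hS : sepsF rest 0 with
      | nil =>
        rw [hS] at ih
        simp only [List.map_nil, bGo]
        rw [PySem.List.slice_from _ (by omega)]
        simp only [bGo, PySem.List.slice_from _ (le_refl (0:Int))] at ih
        simp only [Int.toNat_zero, List.drop_zero] at ih
        simp [sg, hd, ← ih]
      | cons s ss =>
        have hnon := sepsF_nonneg rest 0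
        rw [hS] at hnon
        have hs : 0 ≤ s := hnon s (by simp)
        simp only [List.map_cons, bGo]
        rw [show s + 1 = s + 1 by rfl]
        rw [bGo_shift d rest ss (s + 1) (by omega) (fun x hx => hnon x (by simp [hx]))]
        rw [hS] at ih
        simp only [bGo] at ih
        simp only [sg, hd, ← ih]
        rw [PySem.List.slice_toNat _ le_rfl (by omega),
            PySem.List.slice_toNat _ le_rfl hs]
        have h2 : (s + 1).toNat = s.toNat + 1 := by omega
        simp [h2, List.take_succ_cons]

def stepB (sub : List (List Int)) (st : List (List (List Int)) × Int) (s : Int) :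
    List (List (List Int)) × Int :=
  (st.1 ++ [PySem.List.slice sub (some st.2) (some s)], s + 1)

lemma foldB (sub : List (List Int)) (seps : List Int) :
    ∀ (out : List (List (List Int))) (start : Int),
    (seps.foldl (stepB sub) (out, start)).1 ++
      [PySem.List.slice sub (some (seps.foldl (stepB sub) (out, start)).2) none] =
      out ++ bGo sub start seps := by
  induction seps with
  | nil => intro out start; simp [bGo]
  | cons s ss ih =>
    intro out start
    simp only [List.foldl_cons, stepB]
    rw [ih]
    simp [bGo]

lemma make_grids_alt_eq_sg (data : List (List Int)) : make_grids_alt data = sg data.tail := by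
  show ((sepsF (PySem.List.slice data (some 1) none) 0).foldl
          (stepB (PySem.List.slice data (some 1) none)) ([], 0)).1 ++
        [PySem.List.slice (PySem.List.slice data (some 1) none)
          (some ((sepsF (PySem.List.slice data (some 1) none) 0).foldl
            (stepB (PySem.List.slice data (some 1) none)) ([], 0)).2) none] = sg data.tail
  simp only [PySem.List.slice_from_one]
  rw [foldB data.tail (sepsF data.tail 0) [] 0]
  simp [bGo_sepsF]

-- ===== VERDICT (by name: the statement is the Claim_ definition above) =====
theorem make_grids_spec : Claim_equal_make_grids := by
  intro data _
  show make_grids data = make_grids_alt data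
  rw [make_grids_eq_sg, make_grids_alt_eq_sg]
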